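-- pv_equiv track=rewrite | github.com/Adrigondo/myFacegram | users/my_functions.py | error_form_list
-- ===== SOURCE A (Python) =====
-- def error_form_list(errors):
--     errors=errors.replace("</ul>","")
--     errors=errors.replace("</li>","")
--     errors=errors.replace("__all__"," ")
--     list_errors=[x.split("<li>") for x in errors.split("<ul")]
--     for item in list_errors:
--         n=len(item)
--         i=0
--         while(i<n):
--             item.pop(i)
--             n-=1
--             i+=1
--     vacio=[]
--     espacio=[" "]
--     if list_errors.count(vacio)>0:
--         list_errors.remove(vacio)
--     if list_errors.count(espacio)>0:
--         list_errors.remove(espacio)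
--     return list_errors
-- ===== SOURCE B (Python) =====
-- def error_form_list(errors):
--     errors = errors.replace("</ul>", "").replace("</li>", "").replace("__all__", " ")
--     list_errors = [[e for i, e in enumerate(x.split("<li>")) if i % 2 == 1]
--                    for x in errors.split("<ul")]
--     if [] in list_errors:
--         list_errors.remove([])
--     if [" "] in list_errors:
--         list_errors.remove([" "])
--     return list_errors
-- ===== Notes on version B (the rewrite author's own statement) =====
-- stated objective: simpler
-- what changed: The in-place O(n^2) while/pop loop that keeps every other element of each inner list is replaced by a one-pass enumerate comprehension selecting the odd-indexed elements, and the count()>0/remove() cleanup by the idiomatic 'in'/remove form.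
import Mathlib
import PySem

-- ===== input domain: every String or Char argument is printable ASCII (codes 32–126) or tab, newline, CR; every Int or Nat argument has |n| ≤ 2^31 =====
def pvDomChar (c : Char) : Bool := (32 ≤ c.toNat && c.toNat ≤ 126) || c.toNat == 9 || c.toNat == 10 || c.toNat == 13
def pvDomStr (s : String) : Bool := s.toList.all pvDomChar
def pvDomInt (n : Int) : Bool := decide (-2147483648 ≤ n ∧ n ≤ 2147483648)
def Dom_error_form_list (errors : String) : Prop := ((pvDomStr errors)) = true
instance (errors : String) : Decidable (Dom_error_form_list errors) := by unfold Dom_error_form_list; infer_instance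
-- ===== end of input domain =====

-- B replaces A's in-place while/pop traversal of each inner list by a one-pass enumerate
-- comprehension keeping the odd-indexed elements (objective: simpler); same return value everywhere.

-- ===== PORT A =====
-- the while(i<n): item.pop(i); n-=1; i+=1 loop of A, on the current list with bounds n, i
def pvPopWhile (item : List String) (n i : Nat) : List String :=
  if _h : i < n then
    match PySem.List.pop? item (i : Int) with
    | some (_, rest) => pvPopWhile rest (n - 1) (i + 1)
    | none => item
  else item
termination_by n - i
decreasing_by omega

def error_form_list (errors : String) : List (List String) :=
  let errors1 := PySem.Str.replace errors "</ul>" ""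
  let errors2 := PySem.Str.replace errors1 "</li>" ""
  let errors3 := PySem.Str.replace errors2 "__all__" " "
  let list_errors := ((PySem.Str.split? errors3 "<ul").getD []).map
    (fun x => (PySem.Str.split? x "<li>").getD [])
  let list_errors := list_errors.map (fun item => pvPopWhile item item.length 0)
  let list_errors := if PySem.List.count list_errors ([] : List String) > 0 then
      (PySem.List.remove? list_errors ([] : List String)).getD list_errors else list_errors
  let list_errors := if PySem.List.count list_errors ([" "] : List String) > 0 then
      (PySem.List.remove? list_errors ([" "] : List String)).getD list_errors else list_errors
  list_errors

-- ===== PORT B =====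
def error_form_list_alt (errors : String) : List (List String) :=
  let cleaned := PySem.Str.replace (PySem.Str.replace (PySem.Str.replace errors "</ul>" "") "</li>" "") "__all__" " "
  let list_errors := ((PySem.Str.split? cleaned "<ul").getD []).map
    (fun x => ((PySem.List.enumerate ((PySem.Str.split? x "<li>").getD [])).filter
        (fun p => PySem.Int.mod p.1 2 == 1)).map Prod.snd)
  let list_errors := if ([] : List String) ∈ list_errors then list_errors.erase [] else list_errors
  if ([" "] : List String) ∈ list_errors then list_errors.erase [" "] else list_errors

-- ===== PRECONDITION & SPEC =====
def Spec_error_form_list (errors : String) (out : List (List String)) : Prop := out = error_form_list_alt errors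
instance (errors : String) (out : List (List String)) : Decidable (Spec_error_form_list errors out) := by unfold Spec_error_form_list; infer_instance

-- ===== CLAIM (what is proved, stated in full; the proofs are below) =====
def Claim_equal_error_form_list : Prop := ∀ (errors : String), Dom_error_form_list errors → Spec_error_form_list errors (error_form_list errors)

-- ===== LEMMAS AND PROOFS =====

-- the elements at odd indices, the common value of the pop loop and the filtered enumeration
def pvOdd : List String → List String
  | [] => []
  | [_] => []
  | _ :: b :: t => b :: pvOdd t

lemma pvPop_append (kept rest : List String) (a : String) :
    PySem.List.pop? (kept ++ a :: rest) ((kept.length : Nat) : Int) = some (a, kept ++ rest) := by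
  have h : kept.length < (kept ++ a :: rest).length := by simp
  rw [PySem.List.pop?_natCast _ _ h]
  congr 1
  refine Prod.ext ?_ ?_
  · simpa using List.getElem_append_right (l₁ := kept) (l₂ := a :: rest) (le_refl kept.length)
  · show (kept ++ a :: rest).eraseIdx kept.length = kept ++ rest
    rw [List.eraseIdx_append_of_length_le (le_refl kept.length)]
    simp

lemma pvPopWhile_inv (rest kept : List String) :
    pvPopWhile (kept ++ rest) (kept.length + rest.length) kept.length = kept ++ pvOdd rest := by
  induction rest using pvOdd.induct generalizing kept with
  | case1 =>
      rw [pvPopWhile]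
      simp [pvOdd]
  | case2 a =>
      rw [pvPopWhile, dif_pos (by simp), pvPop_append kept [] a]
      show pvPopWhile (kept ++ []) (kept.length + [a].length - 1) (kept.length + 1)
            = kept ++ pvOdd [a]
      rw [pvPopWhile, dif_neg (by simp)]
      simp [pvOdd]
  | case3 a b t ih =>
      rw [pvPopWhile, dif_pos (by simp), pvPop_append kept (b :: t) a]
      show pvPopWhile (kept ++ b :: t) (kept.length + (a :: b :: t).length - 1) (kept.length + 1)
            = kept ++ pvOdd (a :: b :: t)
      have ih' := ih (kept ++ [b])
      simp only [List.append_assoc, List.singleton_append, List.length_append,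
        List.length_singleton] at ih'
      rw [show kept.length + (a :: b :: t).length - 1 = kept.length + 1 + t.length by
        simp only [List.length_cons]; omega]
      rw [ih']
      simp [pvOdd]

lemma pvEnum_sel (l : List String) (k : Int) (hk : PySem.Int.mod k 2 = 0) :
    ((PySem.List.enumerate l k).filter (fun p => PySem.Int.mod p.1 2 == 1)).map Prod.snd
      = pvOdd l := by
  induction l using pvOdd.induct generalizing k with
  | case1 => simp [PySem.List.enumerate, pvOdd]
  | case2 a =>
      have h2 : (0 : Int) < 2 := by norm_num
      have hk' : k % 2 = 0 := by rw [PySem.Int.mod_eq_emod_of_pos h2] at hk; exact hk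
      simp [PySem.List.enumerate, List.filter_cons, pvOdd]
      omega
  | case3 a b t ih =>
      have h2 : (0 : Int) < 2 := by norm_num
      have hk' : k % 2 = 0 := by rw [PySem.Int.mod_eq_emod_of_pos h2] at hk; exact hk
      have h00 : PySem.Int.mod (k + 1 + 1) 2 = 0 := by
        rw [PySem.Int.mod_eq_emod_of_pos h2]; omega
      have hb0 : (PySem.Int.mod k 2 == 1) = false := by
        rw [PySem.Int.mod_eq_emod_of_pos h2]; simp only [beq_eq_false_iff_ne]; omega
      have hb1 : (PySem.Int.mod (k + 1) 2 == 1) = true := by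
        rw [PySem.Int.mod_eq_emod_of_pos h2]; simp only [beq_iff_eq]; omega
      simp only [PySem.List.enumerate, List.filter_cons, hb0, hb1, Bool.false_eq_true,
        if_true, if_false, List.map_cons, pvOdd]
      rw [ih (k + 1 + 1) h00]

lemma pvInner_eq (l : List String) :
    pvPopWhile l l.length 0 =
      ((PySem.List.enumerate l).filter (fun p => PySem.Int.mod p.1 2 == 1)).map Prod.snd := by
  have h := pvPopWhile_inv l []
  simp only [List.nil_append, List.length_nil, Nat.zero_add] at h
  rw [h, pvEnum_sel l 0 (by decide)]

lemma pvRemove_eq (l : List (List String)) (v : List String) :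
    (if PySem.List.count l v > 0 then (PySem.List.remove? l v).getD l else l)
      = (if v ∈ l then l.erase v else l) := by
  by_cases hv : v ∈ l
  · rw [if_pos hv, if_pos]
    · rw [PySem.List.remove?_eq_some_erase l v hv]; rfl
    · rw [PySem.List.count_eq]; exact List.count_pos_iff.mpr hv
  · rw [if_neg hv, if_neg]
    rw [PySem.List.count_eq]
    simp [List.count_eq_zero_of_not_mem hv]

-- ===== VERDICT (by name: the statement is the Claim_ definition above) =====
set_option maxHeartbeats 1000000 in
theorem error_form_list_spec : Claim_equal_error_form_list := by
  intro errors _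
  show error_form_list errors = error_form_list_alt errors
  simp only [error_form_list, error_form_list_alt, List.map_map, Function.comp_def,
    pvInner_eq, pvRemove_eq]
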